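-- pv_equiv track=rewrite | github.com/danieldevos90/brutally-honest-ai | src/ai/team_dynamics_analyzer.py | count_pronouns
-- ===== SOURCE A (Python) =====
-- from typing import Optional, List, Dict, Any, Tuple
--
-- def count_pronouns(text: str) -> Dict[str, int]:
--     """Count pronoun usage"""
--     text_lower = text.lower()
--     words = text_lower.split()
--
--     we_words = {"we", "wij", "ons", "onze", "our", "us"}
--     i_words = {"ik", "i", "mij", "me", "my", "mijn", "mine"}
--     they_words = {"zij", "they", "hun", "their", "them"}
--
--     return {
--         "we": sum(1 for w in words if w in we_words),
--         "i": sum(1 for w in words if w in i_words),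
--         "they": sum(1 for w in words if w in they_words)
--     }
-- ===== SOURCE B (Python) =====
-- _LOOKUP = {
--     "we": "we", "wij": "we", "ons": "we", "onze": "we", "our": "we", "us": "we",
--     "ik": "i", "i": "i", "mij": "i", "me": "i", "my": "i", "mijn": "i", "mine": "i",
--     "zij": "they", "they": "they", "hun": "they", "their": "they", "them": "they",
-- }
--
-- def count_pronouns(text: str) -> dict:
--     """Count pronoun usage (single indexed pass)."""
--     counts = {"we": 0, "i": 0, "they": 0}
--     for w in text.lower().split():
--         cat = _LOOKUP.get(w)
--         if cat is not None:
--             counts[cat] += 1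
--     return counts
-- ===== Notes on version B (the rewrite author's own statement) =====
-- stated objective: alternative
-- what changed: Replaces three separate membership scans over the word list with one pass dispatching each word through a precomputed word-to-category lookup table and incrementing a counts dict.
import Mathlib
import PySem

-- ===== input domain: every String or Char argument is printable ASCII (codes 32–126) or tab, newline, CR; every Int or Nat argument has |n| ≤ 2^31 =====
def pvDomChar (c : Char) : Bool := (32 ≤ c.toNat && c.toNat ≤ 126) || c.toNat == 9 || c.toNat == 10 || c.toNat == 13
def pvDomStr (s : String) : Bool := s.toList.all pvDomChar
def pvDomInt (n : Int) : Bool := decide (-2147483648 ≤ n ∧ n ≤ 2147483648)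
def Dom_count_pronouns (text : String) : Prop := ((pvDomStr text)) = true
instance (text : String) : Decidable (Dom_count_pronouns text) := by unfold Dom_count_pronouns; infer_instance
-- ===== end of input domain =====

-- B replaces A's three separate membership scans with one pass over the words
-- dispatching through a word→category lookup dict (objective: alternative).

-- ===== PORT A =====
def count_pronouns (text : String) : List (String × Int) :=
  let text_lower := PySem.Str.lower text
  let words := PySem.Str.split₀ text_lower
  let we_words : PySem.Set String := PySem.Set.ofList ["we", "wij", "ons", "onze", "our", "us"]
  let i_words : PySem.Set String := PySem.Set.ofList ["ik", "i", "mij", "me", "my", "mijn", "mine"]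
  let they_words : PySem.Set String := PySem.Set.ofList ["zij", "they", "hun", "their", "them"]
  [("we", (words.map (fun w => if PySem.Set.contains we_words w then (1 : Int) else 0)).sum),
   ("i", (words.map (fun w => if PySem.Set.contains i_words w then (1 : Int) else 0)).sum),
   ("they", (words.map (fun w => if PySem.Set.contains they_words w then (1 : Int) else 0)).sum)]

-- ===== PORT B =====
def pronounLookup : PySem.Dict String String :=
  PySem.Dict.ofList
    [("we", "we"), ("wij", "we"), ("ons", "we"), ("onze", "we"), ("our", "we"), ("us", "we"),
     ("ik", "i"), ("i", "i"), ("mij", "i"), ("me", "i"), ("my", "i"), ("mijn", "i"), ("mine", "i"),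
     ("zij", "they"), ("they", "they"), ("hun", "they"), ("their", "they"), ("them", "they")]

def countsStep (d : PySem.Dict String Int) (w : String) : PySem.Dict String Int :=
  match pronounLookup.get? w with
  | some cat => d.modify cat 0 (· + 1)
  | none => d

def count_pronouns_alt (text : String) : List (String × Int) :=
  let words := PySem.Str.split₀ (PySem.Str.lower text)
  let counts := words.foldl countsStep (PySem.Dict.ofList [("we", (0 : Int)), ("i", 0), ("they", 0)])
  counts.items

-- ===== PRECONDITION & SPEC =====
def Spec_count_pronouns (text : String) (out : List (String × Int)) : Prop := out = count_pronouns_alt text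
instance (text : String) (out : List (String × Int)) : Decidable (Spec_count_pronouns text out) := by unfold Spec_count_pronouns; infer_instance

-- ===== CLAIM (what is proved, stated in full; the proofs are below) =====
def Claim_equal_count_pronouns : Prop := ∀ (text : String), Dom_count_pronouns text → Spec_count_pronouns text (count_pronouns text)

-- ===== LEMMAS AND PROOFS =====

def cntWe (ws : List String) : Int :=
  (ws.map (fun w => if PySem.Set.contains (PySem.Set.ofList ["we", "wij", "ons", "onze", "our", "us"]) w then (1 : Int) else 0)).sum
def cntI (ws : List String) : Int :=
  (ws.map (fun w => if PySem.Set.contains (PySem.Set.ofList ["ik", "i", "mij", "me", "my", "mijn", "mine"]) w then (1 : Int) else 0)).sum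
def cntThey (ws : List String) : Int :=
  (ws.map (fun w => if PySem.Set.contains (PySem.Set.ofList ["zij", "they", "hun", "their", "them"]) w then (1 : Int) else 0)).sum

lemma pronounLookup_eq : pronounLookup =
    PySem.Dict.mk
      [("we", "we"), ("wij", "we"), ("ons", "we"), ("onze", "we"), ("our", "we"), ("us", "we"),
       ("ik", "i"), ("i", "i"), ("mij", "i"), ("me", "i"), ("my", "i"), ("mijn", "i"), ("mine", "i"),
       ("zij", "they"), ("they", "they"), ("hun", "they"), ("their", "they"), ("them", "they")] := by
  decide

lemma countsStep_eq (a b c : Int) (w : String) :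
    countsStep (PySem.Dict.mk [("we", a), ("i", b), ("they", c)]) w =
      PySem.Dict.mk [("we", a + cntWe [w]), ("i", b + cntI [w]), ("they", c + cntThey [w])] := by
  by_cases h1 : w = "we"
  · subst h1; simp [countsStep, cntWe, cntI, cntThey, pronounLookup_eq, PySem.Dict.get?, PySem.Dict.modify, PySem.Dict.insert, PySem.Dict.getD, PySem.Dict.contains, PySem.Set.contains]
  by_cases h2 : w = "wij"
  · subst h2; simp [countsStep, cntWe, cntI, cntThey, pronounLookup_eq, PySem.Dict.get?, PySem.Dict.modify, PySem.Dict.insert, PySem.Dict.getD, PySem.Dict.contains, PySem.Set.contains]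
  by_cases h3 : w = "ons"
  · subst h3; simp [countsStep, cntWe, cntI, cntThey, pronounLookup_eq, PySem.Dict.get?, PySem.Dict.modify, PySem.Dict.insert, PySem.Dict.getD, PySem.Dict.contains, PySem.Set.contains]
  by_cases h4 : w = "onze"
  · subst h4; simp [countsStep, cntWe, cntI, cntThey, pronounLookup_eq, PySem.Dict.get?, PySem.Dict.modify, PySem.Dict.insert, PySem.Dict.getD, PySem.Dict.contains, PySem.Set.contains]
  by_cases h5 : w = "our"
  · subst h5; simp [countsStep, cntWe, cntI, cntThey, pronounLookup_eq, PySem.Dict.get?, PySem.Dict.modify, PySem.Dict.insert, PySem.Dict.getD, PySem.Dict.contains, PySem.Set.contains]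
  by_cases h6 : w = "us"
  · subst h6; simp [countsStep, cntWe, cntI, cntThey, pronounLookup_eq, PySem.Dict.get?, PySem.Dict.modify, PySem.Dict.insert, PySem.Dict.getD, PySem.Dict.contains, PySem.Set.contains]
  by_cases h7 : w = "ik"
  · subst h7; simp [countsStep, cntWe, cntI, cntThey, pronounLookup_eq, PySem.Dict.get?, PySem.Dict.modify, PySem.Dict.insert, PySem.Dict.getD, PySem.Dict.contains, PySem.Set.contains]
  by_cases h8 : w = "i"
  · subst h8; simp [countsStep, cntWe, cntI, cntThey, pronounLookup_eq, PySem.Dict.get?, PySem.Dict.modify, PySem.Dict.insert, PySem.Dict.getD, PySem.Dict.contains, PySem.Set.contains]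
  by_cases h9 : w = "mij"
  · subst h9; simp [countsStep, cntWe, cntI, cntThey, pronounLookup_eq, PySem.Dict.get?, PySem.Dict.modify, PySem.Dict.insert, PySem.Dict.getD, PySem.Dict.contains, PySem.Set.contains]
  by_cases h10 : w = "me"
  · subst h10; simp [countsStep, cntWe, cntI, cntThey, pronounLookup_eq, PySem.Dict.get?, PySem.Dict.modify, PySem.Dict.insert, PySem.Dict.getD, PySem.Dict.contains, PySem.Set.contains]
  by_cases h11 : w = "my"
  · subst h11; simp [countsStep, cntWe, cntI, cntThey, pronounLookup_eq, PySem.Dict.get?, PySem.Dict.modify, PySem.Dict.insert, PySem.Dict.getD, PySem.Dict.contains, PySem.Set.contains]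
  by_cases h12 : w = "mijn"
  · subst h12; simp [countsStep, cntWe, cntI, cntThey, pronounLookup_eq, PySem.Dict.get?, PySem.Dict.modify, PySem.Dict.insert, PySem.Dict.getD, PySem.Dict.contains, PySem.Set.contains]
  by_cases h13 : w = "mine"
  · subst h13; simp [countsStep, cntWe, cntI, cntThey, pronounLookup_eq, PySem.Dict.get?, PySem.Dict.modify, PySem.Dict.insert, PySem.Dict.getD, PySem.Dict.contains, PySem.Set.contains]
  by_cases h14 : w = "zij"
  · subst h14; simp [countsStep, cntWe, cntI, cntThey, pronounLookup_eq, PySem.Dict.get?, PySem.Dict.modify, PySem.Dict.insert, PySem.Dict.getD, PySem.Dict.contains, PySem.Set.contains]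
  by_cases h15 : w = "they"
  · subst h15; simp [countsStep, cntWe, cntI, cntThey, pronounLookup_eq, PySem.Dict.get?, PySem.Dict.modify, PySem.Dict.insert, PySem.Dict.getD, PySem.Dict.contains, PySem.Set.contains]
  by_cases h16 : w = "hun"
  · subst h16; simp [countsStep, cntWe, cntI, cntThey, pronounLookup_eq, PySem.Dict.get?, PySem.Dict.modify, PySem.Dict.insert, PySem.Dict.getD, PySem.Dict.contains, PySem.Set.contains]
  by_cases h17 : w = "their"
  · subst h17; simp [countsStep, cntWe, cntI, cntThey, pronounLookup_eq, PySem.Dict.get?, PySem.Dict.modify, PySem.Dict.insert, PySem.Dict.getD, PySem.Dict.contains, PySem.Set.contains]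
  by_cases h18 : w = "them"
  · subst h18; simp [countsStep, cntWe, cntI, cntThey, pronounLookup_eq, PySem.Dict.get?, PySem.Dict.modify, PySem.Dict.insert, PySem.Dict.getD, PySem.Dict.contains, PySem.Set.contains]
  have hfind : pronounLookup.get? w = none := by
    rw [pronounLookup_eq]
    simp [PySem.Dict.get?, Ne.symm h1, Ne.symm h2, Ne.symm h3, Ne.symm h4, Ne.symm h5, Ne.symm h6, Ne.symm h7, Ne.symm h8, Ne.symm h9, Ne.symm h10, Ne.symm h11, Ne.symm h12, Ne.symm h13, Ne.symm h14, Ne.symm h15, Ne.symm h16, Ne.symm h17, Ne.symm h18]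
  simp [countsStep, hfind, cntWe, cntI, cntThey, PySem.Set.contains, h1, h2, h3, h4, h5, h6, h7, h8, h9, h10, h11, h12, h13, h14, h15, h16, h17, h18]

lemma foldl_countsStep (ws : List String) (a b c : Int) :
    ws.foldl countsStep (PySem.Dict.mk [("we", a), ("i", b), ("they", c)]) =
      PySem.Dict.mk [("we", a + cntWe ws), ("i", b + cntI ws), ("they", c + cntThey ws)] := by
  induction ws generalizing a b c with
  | nil => simp [cntWe, cntI, cntThey]
  | cons w ws ih =>
    rw [List.foldl_cons, countsStep_eq, ih]
    simp [cntWe, cntI, cntThey, add_assoc]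

-- ===== VERDICT (by name: the statement is the Claim_ definition above) =====
theorem count_pronouns_spec : Claim_equal_count_pronouns := by
  intro text _
  show count_pronouns text = count_pronouns_alt text
  simp only [count_pronouns, count_pronouns_alt]
  rw [show PySem.Dict.ofList [("we", (0 : Int)), ("i", 0), ("they", 0)] =
      PySem.Dict.mk [("we", (0 : Int)), ("i", 0), ("they", 0)] from rfl, foldl_countsStep]
  simp [cntWe, cntI, cntThey]
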